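-- pv_equiv track=rewrite | github.com/HarshitSahu8/Training | Training/Day-4/q1.py | AllWordsContainsChar
-- ===== SOURCE A (Python) =====
-- def AllWordsContainsChar(string, ch):
--     leng = len(string)
--     flag = 0
--     for i in range(leng):
--         if string[i] == ch:
--             flag = 1
--         if string[i] == ' ':
--             if flag == 0:
--                 return False
--             else:
--                 flag = 0
--     if flag == 0:
--         return False
--     else:
--         return True
-- ===== SOURCE B (Python) =====
-- def AllWordsContainsChar(string, ch):
--     return all(any(c == ch for c in word) for word in string.split(' '))
-- ===== Notes on version B (the rewrite author's own statement) =====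
-- stated objective: simpler
-- what changed: Replaced the index loop with a manually toggled/reset flag and early returns by a one-liner: split the string on single spaces and check every chunk contains the character.
import Mathlib
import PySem

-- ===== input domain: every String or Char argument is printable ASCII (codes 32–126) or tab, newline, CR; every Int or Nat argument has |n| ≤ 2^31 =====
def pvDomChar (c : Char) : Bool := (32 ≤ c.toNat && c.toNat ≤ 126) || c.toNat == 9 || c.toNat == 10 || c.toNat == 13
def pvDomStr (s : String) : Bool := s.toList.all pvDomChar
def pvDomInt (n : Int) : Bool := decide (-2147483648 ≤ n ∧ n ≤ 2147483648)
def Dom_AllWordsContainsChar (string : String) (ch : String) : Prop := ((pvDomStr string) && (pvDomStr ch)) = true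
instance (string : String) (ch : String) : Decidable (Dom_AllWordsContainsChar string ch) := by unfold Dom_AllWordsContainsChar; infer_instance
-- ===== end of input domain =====

-- B replaces A's per-character flag loop by split-on-space + all/any; proved equal on all inputs.

-- ===== PORT A =====
-- the for-loop over string's characters with the flag and the two early returns, step for step
def awccLoop (ch : String) (flag : Int) : List Char → Bool
  | [] => if flag == 0 then false else true          -- the code after the loop
  | c :: rest =>
    let flag1 := if ch.toList == [c] then 1 else flag    -- string[i] == ch (1-char string vs ch)
    if c == ' ' then                                      -- string[i] == ' '
      (if flag1 == 0 then false else awccLoop ch 0 rest)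
    else awccLoop ch flag1 rest

def AllWordsContainsChar (string : String) (ch : String) : Bool :=
  awccLoop ch 0 string.toList

-- ===== PORT B =====
-- all(any(c == ch for c in word) for word in string.split(' ')); str.split(' ') is List.splitOn on chars
def AllWordsContainsChar_alt (string : String) (ch : String) : Bool :=
  (string.toList.splitOn ' ').all (fun w => w.any (fun c => ch.toList == [c]))

-- ===== PRECONDITION & SPEC =====
def Spec_AllWordsContainsChar (string : String) (ch : String) (out : Bool) : Prop := out = AllWordsContainsChar_alt string ch
instance (string : String) (ch : String) (out : Bool) : Decidable (Spec_AllWordsContainsChar string ch out) := by unfold Spec_AllWordsContainsChar; infer_instance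

-- ===== CLAIM (what is proved, stated in full; the proofs are below) =====
def Claim_equal_AllWordsContainsChar : Prop := ∀ (string : String) (ch : String), Dom_AllWordsContainsChar string ch → Spec_AllWordsContainsChar string ch (AllWordsContainsChar string ch)

-- ===== LEMMAS AND PROOFS =====

-- when ch is the single space, A's flag is zeroed in the very iteration that sets it: the loop returns false
theorem awccLoop_space (cs : List Char) : awccLoop " " 0 cs = false := by
  induction cs with
  | nil => simp [awccLoop]
  | cons c rest ih =>
    by_cases h : c = ' '
    · subst h; simp [awccLoop, ih]
    · have h2 : (c == ' ') = false := by simpa using h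
      have h3 : ¬ ' ' = c := fun he => h he.symm
      simp [awccLoop, h2, h3, ih]

-- and no chunk of splitOn ' ' contains a space, so B is false as well
theorem splitOn_space_all_false (cs : List Char) :
    (cs.splitOn ' ').all (fun w => w.any (fun c => (" ").toList == [c])) = false := by
  simp only [List.splitOn]
  induction cs with
  | nil => simp [List.splitOnP_nil]
  | cons c rest ih =>
    rw [List.splitOnP_cons]
    by_cases h : c = ' '
    · subst h
      rw [if_pos (by simp)]
      simp
    · have h2 : (c == ' ') = false := by simpa using h
      have h3 : ¬ ' ' = c := fun he => h he.symm
      obtain ⟨w, ws, hw⟩ := List.exists_cons_of_ne_nil (List.splitOnP_ne_nil _ rest)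
      rw [hw] at ih ⊢
      simp only [h2, Bool.false_eq_true, if_false, List.modifyHead, List.all_cons,
        List.any_cons] at ih ⊢
      simpa [h3] using ih

-- main invariant: A's loop with current flag equals B's word-wise check, the first chunk
-- counting as satisfied when the flag is already set (ch ≠ " ", so a space never matches ch)
theorem awccLoop_eq (ch : String) (hch : ch ≠ " ") (cs : List Char) (flag : Int) :
    awccLoop ch flag cs =
      ((!(flag == 0) || (cs.splitOn ' ').headI.any (fun c => ch.toList == [c])) &&
        ((cs.splitOn ' ').tail.all (fun w => w.any (fun c => ch.toList == [c])))) := by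
  simp only [List.splitOn]
  have hchl : (ch.toList == [' ']) = false := by
    simp only [beq_eq_false_iff_ne]; intro he
    exact hch (by rw [← String.ofList_toList (s := ch), he])
  induction cs generalizing flag with
  | nil =>
    by_cases h : flag = 0 <;> simp [awccLoop, List.splitOnP_nil, h]
  | cons c rest ih =>
    obtain ⟨w, ws, hw⟩ := List.exists_cons_of_ne_nil (List.splitOnP_ne_nil _ rest)
    by_cases hc : c = ' '
    · subst hc
      have hsp : List.splitOnP (fun x => x == ' ') (' ' :: rest) = [] :: w :: ws := by
        rw [List.splitOnP_cons, if_pos (by simp), hw]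
      rw [hsp]
      by_cases hf : flag = 0
      · simp [awccLoop, hchl, hf]
      · have hf2 : (flag == 0) = false := by simpa using hf
        simp [awccLoop, hchl, hf2, ih 0, hw]
    · have hc2 : (c == ' ') = false := by simpa using hc
      have hsp : List.splitOnP (fun x => x == ' ') (c :: rest) = (c :: w) :: ws := by
        rw [List.splitOnP_cons, hc2, if_neg Bool.false_ne_true, hw]; rfl
      rw [hsp]
      by_cases hp : ch.toList = [c]
      · have hp2 : (ch.toList == [c]) = true := by simpa using hp
        simp [awccLoop, hc2, hp2, ih 1, hw, show ((1 : Int) == 0) = false from rfl]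
      · have hp2 : (ch.toList == [c]) = false := by simpa using hp
        simp [awccLoop, hc2, hp2, ih flag, hw]

-- ===== VERDICT (by name: the statement is the Claim_ definition above) =====
theorem AllWordsContainsChar_spec : Claim_equal_AllWordsContainsChar := by
  intro s ch _
  unfold Spec_AllWordsContainsChar AllWordsContainsChar AllWordsContainsChar_alt
  by_cases hch : ch = " "
  · subst hch
    rw [awccLoop_space, splitOn_space_all_false]
  · rw [awccLoop_eq ch hch]
    obtain ⟨w, ws, hw⟩ := List.exists_cons_of_ne_nil (List.splitOnP_ne_nil _ s.toList)
    simp [List.splitOn] at hw ⊢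
    rw [hw]
    simp
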